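-- pv_equiv track=rewrite | github.com/eliottcassidy2000/math | 04-computation/alpha_p13_crossover.py | count_directed_ham_cycles
-- ===== SOURCE A (Python) =====
-- def count_directed_ham_cycles(A, verts):
--     k = len(verts)
--     if k == 3:
--         a, b, c = verts
--         return A[a][b]*A[b][c]*A[c][a] + A[a][c]*A[c][b]*A[b][a]
--     start = 0
--     dp = {}
--     dp[(1 << start, start)] = 1
--     for mask in range(1, 1 << k):
--         if not (mask & (1 << start)):
--             continue
--         for v in range(k):
--             if not (mask & (1 << v)):
--                 continue
--             key = (mask, v)
--             if key not in dp or dp[key] == 0: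
--                 continue
--             cnt = dp[key]
--             for w in range(k):
--                 if mask & (1 << w):
--                     continue
--                 if A[verts[v]][verts[w]]:
--                     nkey = (mask | (1 << w), w)
--                     dp[nkey] = dp.get(nkey, 0) + cnt
--     full = (1 << k) - 1
--     total = 0
--     for v in range(k):
--         if v == start:
--             continue
--         key = (full, v)
--         if key in dp and dp[key] > 0 and A[verts[v]][verts[start]]:
--             total += dp[key]
--     return total
-- ===== SOURCE B (Python) =====
-- def count_directed_ham_cycles(A, verts):
--     k = len(verts)
--     if k == 3:
--         a, b, c = verts
--         return A[a][b]*A[b][c]*A[c][a] + A[a][c]*A[c][b]*A[b][a]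
--     if k < 2:
--         return 0
--
--     def dfs(mask, cur, count):
--         if count >= k:
--             return 1 if A[verts[cur]][verts[0]] else 0
--         total = 0
--         for w in range(k):
--             if not (mask >> w) & 1 and A[verts[cur]][verts[w]]:
--                 total += dfs(mask | (1 << w), w, count + 1)
--         return total
--
--     return dfs(1, 0, 1)
-- ===== Notes on version B (the rewrite author's own statement) =====
-- stated objective: alternative
-- what changed: The general case's forward bitmask dynamic program over a dict of (mask, vertex) keys is replaced by a recursive backtracking DFS that fixes the start vertex, extends a visited bitmask edge by edge, and counts 1 per completed cycle; the k==3 weighted special case is kept.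
-- outside the precondition, e.g. on count_directed_ham_cycles([[0, 0], [0]], [0, 1]): A returns 0, B returns 0
import Mathlib
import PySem

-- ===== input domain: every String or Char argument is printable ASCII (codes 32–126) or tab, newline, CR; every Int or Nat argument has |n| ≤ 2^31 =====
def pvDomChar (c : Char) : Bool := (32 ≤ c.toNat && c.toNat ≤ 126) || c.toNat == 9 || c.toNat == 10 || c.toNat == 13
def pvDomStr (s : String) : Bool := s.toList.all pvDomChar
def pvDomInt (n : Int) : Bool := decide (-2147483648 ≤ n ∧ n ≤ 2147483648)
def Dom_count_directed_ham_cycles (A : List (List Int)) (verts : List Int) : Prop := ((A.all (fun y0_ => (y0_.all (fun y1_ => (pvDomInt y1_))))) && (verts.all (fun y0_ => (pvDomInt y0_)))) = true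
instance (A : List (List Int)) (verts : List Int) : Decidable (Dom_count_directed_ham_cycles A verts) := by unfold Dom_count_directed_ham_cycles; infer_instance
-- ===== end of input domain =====

-- B replaces A's forward bitmask dict DP (general case) by a recursive backtracking DFS
-- that counts each directed Hamiltonian cycle once; same k==3 weighted branch; objective: alternative.


-- ===== PORT A =====
-- Shared helpers for both ports.
-- A[x][y] for Python int indices (negative = from the end); the `.getD` defaults fire only
-- outside Pre_ (where Python raises IndexError), so this is exact on Pre_.
def pvMat (M : List (List Int)) (x y : Int) : Int :=
  (PySem.List.pyGet? ((PySem.List.pyGet? M x).getD []) y).getD 0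

-- verts[i] for a loop index 0 ≤ i < len(verts): always in range, exact.
def pvVert (verts : List Int) (i : Nat) : Int := verts.getD i 0

-- A[verts[v]][verts[w]]
def pvEdge (M : List (List Int)) (verts : List Int) (v w : Nat) : Int :=
  pvMat M (pvVert verts v) (pvVert verts w)

-- truthiness of A[verts[v]][verts[w]], the edge test both Pythons branch on
def pvE (M : List (List Int)) (verts : List Int) : Nat → Nat → Bool :=
  fun v w => decide (pvEdge M verts v w ≠ 0)

-- A-side helpers: the three nested loops of the Python DP, over an edge predicate E.
-- body of the inner `for w in range(k)`
def pvWBody (E : Nat → Nat → Bool) (mask v : Nat) (cnt : Int)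
    (dp : PySem.Dict (Nat × Nat) Int) (w : Nat) : PySem.Dict (Nat × Nat) Int :=
  if mask &&& (1 <<< w) ≠ 0 then dp
  else if E v w = true then
    PySem.Dict.insert dp (mask ||| (1 <<< w), w)
      (PySem.Dict.getD dp (mask ||| (1 <<< w), w) 0 + cnt)
  else dp

-- body of `for v in range(k)`
def pvVBody (E : Nat → Nat → Bool) (k mask : Nat)
    (dp : PySem.Dict (Nat × Nat) Int) (v : Nat) : PySem.Dict (Nat × Nat) Int :=
  if mask &&& (1 <<< v) = 0 then dp
  else match PySem.Dict.get? dp (mask, v) with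
    | none => dp
    | some cnt =>
      if cnt = 0 then dp
      else (List.range k).foldl (pvWBody E mask v cnt) dp

-- body of `for mask in range(1, 1 << k)`
def pvMBody (E : Nat → Nat → Bool) (k : Nat)
    (dp : PySem.Dict (Nat × Nat) Int) (mask : Nat) : PySem.Dict (Nat × Nat) Int :=
  if mask &&& (1 <<< 0) = 0 then dp
  else (List.range k).foldl (pvVBody E k mask) dp

-- dp after the whole mask loop, started from dp = {(1 << 0, 0): 1}
def pvDP (E : Nat → Nat → Bool) (k : Nat) : PySem.Dict (Nat × Nat) Int :=
  (List.range' 1 ((1 <<< k) - 1)).foldl (pvMBody E k)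
    (PySem.Dict.insert PySem.Dict.empty (1 <<< 0, 0) 1)

-- the final `total` loop
def pvTotal (E : Nat → Nat → Bool) (k : Nat) : Int :=
  (List.range k).foldl (fun total v =>
    if v = 0 then total
    else match PySem.Dict.get? (pvDP E k) ((1 <<< k) - 1, v) with
      | none => total
      | some c => if c > 0 ∧ E v 0 = true then total + c else total) 0

def count_directed_ham_cycles (A : List (List Int)) (verts : List Int) : Int :=
  let k := verts.length
  if k = 3 then
    pvMat A (pvVert verts 0) (pvVert verts 1) * pvMat A (pvVert verts 1) (pvVert verts 2) *
        pvMat A (pvVert verts 2) (pvVert verts 0) +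
      pvMat A (pvVert verts 0) (pvVert verts 2) * pvMat A (pvVert verts 2) (pvVert verts 1) *
        pvMat A (pvVert verts 1) (pvVert verts 0)
  else
    pvTotal (pvE A verts) k

-- ===== PORT B =====
-- B-side helper: the recursive backtracking DFS of Source B, over an edge predicate E.
def pvDfs (E : Nat → Nat → Bool) (k mask cur count : Nat) : Int :=
  if count ≥ k then (if E cur 0 = true then 1 else 0)
  else (List.range k).foldl (fun total w =>
    if (mask >>> w) &&& 1 = 0 ∧ E cur w = true then
      total + pvDfs E k (mask ||| (1 <<< w)) w (count + 1)
    else total) 0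
termination_by k - count
decreasing_by omega

def count_directed_ham_cycles_alt (A : List (List Int)) (verts : List Int) : Int :=
  let k := verts.length
  if k = 3 then
    pvMat A (pvVert verts 0) (pvVert verts 1) * pvMat A (pvVert verts 1) (pvVert verts 2) *
        pvMat A (pvVert verts 2) (pvVert verts 0) +
      pvMat A (pvVert verts 0) (pvVert verts 2) * pvMat A (pvVert verts 2) (pvVert verts 1) *
        pvMat A (pvVert verts 1) (pvVert verts 0)
  else if k < 2 then 0
  else pvDfs (pvE A verts) k 1 0 1

-- ===== PRECONDITION & SPEC =====
-- Pre_ excludes inputs on which Python A raises IndexError: unless the vertex list is trivially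
-- short (len ≤ 1, where A indexes nothing and returns 0), every entry of verts must be an
-- in-range (possibly negative) Python index into A, and every pair of entries an in-range
-- row/column pair.  This is slightly narrower than A's lazy access pattern: on some inputs
-- whose out-of-range accesses are never reached through a truthy edge, A still returns (see cites).
def Pre_count_directed_ham_cycles (A : List (List Int)) (verts : List Int) : Prop :=
  verts.length ≤ 1 ∨
    ∀ x ∈ verts, PySem.Raise.InRange A.length x ∧
      ∀ y ∈ verts, PySem.Raise.InRange ((PySem.List.pyGet? A x).getD []).length y
instance (A : List (List Int)) (verts : List Int) : Decidable (Pre_count_directed_ham_cycles A verts) := by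
  unfold Pre_count_directed_ham_cycles; infer_instance

def pvWitness_count_directed_ham_cycles : List (List Int) × List Int :=
  ([[0, 1], [1, 0]], [0, 1])

def Spec_count_directed_ham_cycles (A : List (List Int)) (verts : List Int) (out : Int) : Prop := out = count_directed_ham_cycles_alt A verts
instance (A : List (List Int)) (verts : List Int) (out : Int) : Decidable (Spec_count_directed_ham_cycles A verts out) := by unfold Spec_count_directed_ham_cycles; infer_instance

-- ===== CLAIM (what is proved, stated in full; the proofs are below) =====
def Claim_equal_count_directed_ham_cycles : Prop := ∀ (A : List (List Int)) (verts : List Int), Dom_count_directed_ham_cycles A verts → Pre_count_directed_ham_cycles A verts → Spec_count_directed_ham_cycles A verts (count_directed_ham_cycles A verts)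

-- ===== LEMMAS AND PROOFS =====

-- ## bit utilities

-- clearing a set bit decreases the number
lemma pv_xor_lt {m v : Nat} (h : m.testBit v = true) : m ^^^ (1 <<< v) < m := by
  refine Nat.lt_of_testBit v ?_ h ?_
  · simp [Nat.testBit_xor, h, Nat.one_shiftLeft, Nat.testBit_two_pow_self]
  · intro j hj
    simp [Nat.testBit_xor, Nat.one_shiftLeft, Nat.testBit_two_pow_of_ne (show v ≠ j by omega)]

lemma pv_testBit_shift (w i : Nat) : (1 <<< w).testBit i = decide (i = w) := by
  rw [Nat.one_shiftLeft]
  rcases eq_or_ne i w with rfl | h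
  · simp [Nat.testBit_two_pow_self]
  · simp [Nat.testBit_two_pow_of_ne (Ne.symm h), h]

lemma pv_testBit_or (m w i : Nat) :
    (m ||| 1 <<< w).testBit i = (m.testBit i || decide (i = w)) := by
  rw [Nat.testBit_or, pv_testBit_shift]

lemma pv_testBit_xor (m v i : Nat) :
    (m ^^^ 1 <<< v).testBit i = ((m.testBit i).xor (decide (i = v))) := by
  rw [Nat.testBit_xor, pv_testBit_shift]

lemma pv_or_xor {m w : Nat} (h : m.testBit w = false) : (m ||| 1 <<< w) ^^^ (1 <<< w) = m := by
  apply Nat.eq_of_testBit_eq; intro i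
  rw [pv_testBit_xor, pv_testBit_or]
  rcases eq_or_ne i w with rfl | hne
  · simp [h]
  · simp [hne]

lemma pv_xor_or {m v : Nat} (h : m.testBit v = true) : (m ^^^ 1 <<< v) ||| (1 <<< v) = m := by
  apply Nat.eq_of_testBit_eq; intro i
  rw [pv_testBit_or, pv_testBit_xor]
  rcases eq_or_ne i v with rfl | hne
  · simp [h]
  · simp [hne]

lemma pv_or_lt {m w k : Nat} (hm : m < 2 ^ k) (hw : w < k) : m ||| 1 <<< w < 2 ^ k := by
  have h : (1 <<< w) < 2 ^ k := by
    rw [Nat.one_shiftLeft]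
    exact Nat.pow_lt_pow_right (by omega) hw
  exact Nat.or_lt_two_pow hm h

lemma pv_and_eq_zero (m w : Nat) : m &&& (1 <<< w) = 0 ↔ m.testBit w = false := by
  rw [Nat.one_shiftLeft, Nat.and_two_pow]
  rcases h : m.testBit w <;> simp

lemma pv_shift_and (m w : Nat) : ((m >>> w) &&& 1 = 0) ↔ m.testBit w = false := by
  rw [Nat.testBit, Nat.and_comm]
  rcases h : 1 &&& (m >>> w) with _ | n <;> simp

lemma pv_testBit_one (i : Nat) : (1 : Nat).testBit i = decide (i = 0) := by
  rcases eq_or_ne i 0 with rfl | h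
  · simp
  · rw [show (1 : Nat) = 2 ^ 0 from rfl, Nat.testBit_two_pow_of_ne (Ne.symm h)]
    simp [h]

-- ## popcount below k

def pvPc (k m : Nat) : Nat := ((Finset.range k).filter (fun i => m.testBit i = true)).card

lemma pvPc_or {k m w : Nat} (hw : w < k) (h : m.testBit w = false) :
    pvPc k (m ||| 1 <<< w) = pvPc k m + 1 := by
  unfold pvPc
  have hfil : (Finset.range k).filter (fun i => (m ||| 1 <<< w).testBit i = true)
      = insert w ((Finset.range k).filter (fun i => m.testBit i = true)) := by
    ext i
    simp only [Finset.mem_filter, Finset.mem_insert, Finset.mem_range, pv_testBit_or,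
      Bool.or_eq_true, decide_eq_true_eq]
    constructor
    · rintro ⟨hi, hb | rfl⟩
      · exact Or.inr ⟨hi, hb⟩
      · exact Or.inl rfl
    · rintro (rfl | ⟨hi, hb⟩)
      · exact ⟨hw, Or.inr rfl⟩
      · exact ⟨hi, Or.inl hb⟩
  rw [hfil, Finset.card_insert_of_notMem]
  simp [Finset.mem_filter, h]

lemma pvPc_xor {k m v : Nat} (hv : v < k) (h : m.testBit v = true) :
    pvPc k m = pvPc k (m ^^^ 1 <<< v) + 1 := by
  have hb : (m ^^^ 1 <<< v).testBit v = false := by simp [h]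
  have h2 := pvPc_or (k := k) hv hb
  rwa [pv_xor_or h] at h2

lemma pvPc_one {k : Nat} (hk : 1 ≤ k) : pvPc k 1 = 1 := by
  unfold pvPc
  have hfil : (Finset.range k).filter (fun i => (1 : Nat).testBit i = true) = {0} := by
    ext i
    simp only [Finset.mem_filter, Finset.mem_range, pv_testBit_one, decide_eq_true_eq,
      Finset.mem_singleton]
    constructor
    · rintro ⟨_, h⟩; exact h
    · rintro rfl; exact ⟨by omega, rfl⟩
  rw [hfil]; rfl

lemma pv_eq_one {k m : Nat} (hm : m < 2 ^ k) (h0 : m.testBit 0 = true) (h : pvPc k m = 1) :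
    m = 1 := by
  apply Nat.eq_of_testBit_eq; intro i
  rw [pv_testBit_one]
  rcases eq_or_ne i 0 with rfl | hi
  · simp [h0]
  · simp only [decide_eq_false hi]
    by_cases hik : i < k
    · by_contra hb
      rw [Bool.not_eq_false] at hb
      have hsub : ({0, i} : Finset Nat)
          ⊆ (Finset.range k).filter (fun j => m.testBit j = true) := by
        intro x hx
        rcases Finset.mem_insert.mp hx with rfl | hx
        · exact Finset.mem_filter.mpr ⟨Finset.mem_range.mpr (by omega), h0⟩
        · rw [Finset.mem_singleton.mp hx]
          exact Finset.mem_filter.mpr ⟨Finset.mem_range.mpr hik, hb⟩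
      have hcard := Finset.card_le_card hsub
      rw [Finset.card_pair (Ne.symm hi)] at hcard
      unfold pvPc at h
      omega
    · exact Nat.testBit_lt_two_pow
        (lt_of_lt_of_le hm (Nat.pow_le_pow_right (by omega) (by omega)))

lemma pvPc_full (k : Nat) : pvPc k (2 ^ k - 1) = k := by
  unfold pvPc
  have hfil : (Finset.range k).filter (fun i => (2 ^ k - 1).testBit i = true)
      = Finset.range k := by
    apply Finset.filter_true_of_mem
    intro i hi
    rw [Nat.testBit_two_pow_sub_one]
    simpa using Finset.mem_range.mp hi
  rw [hfil, Finset.card_range]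

lemma pv_eq_full {k m : Nat} (hm : m < 2 ^ k) (h : pvPc k m = k) : m = 2 ^ k - 1 := by
  have hfil : (Finset.range k).filter (fun i => m.testBit i = true) = Finset.range k := by
    apply Finset.eq_of_subset_of_card_le (Finset.filter_subset _ _)
    rw [Finset.card_range]
    unfold pvPc at h
    omega
  apply Nat.eq_of_testBit_eq; intro i
  rw [Nat.testBit_two_pow_sub_one]
  by_cases hik : i < k
  · have : i ∈ (Finset.range k).filter (fun i => m.testBit i = true) := by
      rw [hfil]; exact Finset.mem_range.mpr hik
    have hb := (Finset.mem_filter.mp this).2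
    simp [hb, hik]
  · have hb : m.testBit i = false := Nat.testBit_lt_two_pow
      (lt_of_lt_of_le hm (Nat.pow_le_pow_right (by omega) (by omega)))
    simp [hb, hik]

-- ## sum / fold bridges

lemma pv_sum_range (f : Nat → Int) (n : Nat) :
    ((List.range n).map f).sum = ∑ i ∈ Finset.range n, f i := by
  induction n with
  | zero => simp
  | succ n ih =>
    rw [List.range_succ, Finset.sum_range_succ, List.map_append, List.sum_append, ih]
    simp

lemma pv_foldl_ite_add_mem (p : Nat → Prop) [DecidablePred p] (f : Nat → Int)
    (g : Int → Nat → Int) :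
    ∀ (l : List Nat), (∀ acc w, w ∈ l → g acc w = if p w then acc + f w else acc) →
      ∀ init : Int, l.foldl g init = init + (l.map fun w => if p w then f w else 0).sum := by
  intro l
  induction l with
  | nil => intro _ init; simp
  | cons x xs ih =>
    intro hg init
    simp only [List.foldl_cons, List.map_cons, List.sum_cons]
    rw [hg init x (by simp)]
    rw [ih (fun acc w hw => hg acc w (by simp [hw]))]
    by_cases h : p x
    · rw [if_pos h, if_pos h]; ring
    · rw [if_neg h, if_neg h]; ring

-- ## unfolding lemmas for the DFS and the path-count function

lemma pvDfs_stop {E : Nat → Nat → Bool} {k m v count : Nat} (h : count ≥ k) :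
    pvDfs E k m v count = if E v 0 = true then 1 else 0 := by
  rw [pvDfs, if_pos h]

lemma pvDfs_step {E : Nat → Nat → Bool} {k m v count : Nat} (h : count < k) :
    pvDfs E k m v count = ∑ w ∈ Finset.range k,
      if m.testBit w = false ∧ E v w = true
      then pvDfs E k (m ||| 1 <<< w) w (count + 1) else 0 := by
  rw [pvDfs, if_neg (by omega : ¬ count ≥ k)]
  rw [pv_foldl_ite_add_mem (fun w => (m >>> w) &&& 1 = 0 ∧ E v w = true)
        (fun w => pvDfs E k (m ||| 1 <<< w) w (count + 1)) _ (List.range k)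
        (fun acc w _ => rfl) 0]
  rw [zero_add, pv_sum_range]
  exact Finset.sum_congr rfl fun w _ => if_congr (and_congr_left' (pv_shift_and m w)) rfl rfl

-- number of (simple, start-at-0) paths with vertex set `m` (a bitmask over [0,k)) ending at v
def nPath (E : Nat → Nat → Bool) (k m v : Nat) : Int :=
  if v = 0 then (if m = 1 then 1 else 0)
  else if h : m.testBit 0 = true ∧ m.testBit v = true then
    ((List.range k).map (fun u =>
      if (m ^^^ (1 <<< v)).testBit u = true ∧ E u v = true
      then nPath E k (m ^^^ (1 <<< v)) u else 0)).sum
  else 0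
termination_by m
decreasing_by exact pv_xor_lt h.2

lemma nPath_one_zero (E : Nat → Nat → Bool) (k : Nat) : nPath E k 1 0 = 1 := by
  rw [nPath]; simp

lemma nPath_zero_of_ne_one {E : Nat → Nat → Bool} {k m : Nat} (h : m ≠ 1) :
    nPath E k m 0 = 0 := by
  rw [nPath]; simp [h]

lemma nPath_rec {E : Nat → Nat → Bool} {k m v : Nat} (hv : v ≠ 0)
    (h0 : m.testBit 0 = true) (hb : m.testBit v = true) :
    nPath E k m v = ∑ u ∈ Finset.range k,
      if (m ^^^ 1 <<< v).testBit u = true ∧ E u v = true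
      then nPath E k (m ^^^ 1 <<< v) u else 0 := by
  rw [nPath, if_neg hv, dif_pos (⟨h0, hb⟩ : m.testBit 0 = true ∧ m.testBit v = true),
    pv_sum_range]

lemma nPath_or {E : Nat → Nat → Bool} {k m w : Nat} (h0 : m.testBit 0 = true)
    (hw : m.testBit w = false) :
    nPath E k (m ||| 1 <<< w) w = ∑ u ∈ Finset.range k,
      if m.testBit u = true ∧ E u w = true then nPath E k m u else 0 := by
  have hw0 : w ≠ 0 := by rintro rfl; rw [h0] at hw; cases hw
  have hb0 : (m ||| 1 <<< w).testBit 0 = true := by rw [pv_testBit_or, h0]; rfl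
  have hbw : (m ||| 1 <<< w).testBit w = true := by rw [pv_testBit_or]; simp
  rw [nPath_rec hw0 hb0 hbw, pv_or_xor hw]

lemma nPath_nonneg (E : Nat → Nat → Bool) (k : Nat) : ∀ m v, 0 ≤ nPath E k m v := by
  intro m
  induction m using Nat.strong_induction_on with
  | _ m ih =>
    intro v
    rw [nPath]
    split
    · split <;> norm_num
    · split
      · rename_i h
        apply List.sum_nonneg
        intro x hx
        obtain ⟨u, _, rfl⟩ := List.mem_map.mp hx
        split
        · exact ih _ (pv_xor_lt h.2) u
        · exact le_refl 0
      · exact le_refl 0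

-- ## the telescoping invariant

def pvTT (E : Nat → Nat → Bool) (k t : Nat) : Int :=
  ∑ m ∈ (Finset.range (2 ^ k)).filter (fun m => pvPc k m = t ∧ m.testBit 0 = true),
    ∑ v ∈ (Finset.range k).filter (fun v => m.testBit v = true),
      nPath E k m v * pvDfs E k m v t

lemma pvTT_base {E : Nat → Nat → Bool} {k : Nat} (hk : 1 ≤ k) :
    pvTT E k 1 = pvDfs E k 1 0 1 := by
  unfold pvTT
  have h1 : (Finset.range (2 ^ k)).filter (fun m => pvPc k m = 1 ∧ m.testBit 0 = true)
      = {1} := by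
    ext m
    simp only [Finset.mem_filter, Finset.mem_range, Finset.mem_singleton]
    constructor
    · rintro ⟨hm, hpc, h0⟩; exact pv_eq_one hm h0 hpc
    · rintro rfl
      refine ⟨?_, pvPc_one hk, by rfl⟩
      exact Nat.one_lt_two_pow_iff.mpr (by omega)
  rw [h1, Finset.sum_singleton]
  have h2 : (Finset.range k).filter (fun v => (1 : Nat).testBit v = true) = {0} := by
    ext v
    simp only [Finset.mem_filter, Finset.mem_range, pv_testBit_one, decide_eq_true_eq,
      Finset.mem_singleton]
    constructor
    · rintro ⟨_, h⟩; exact h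
    · rintro rfl; exact ⟨by omega, rfl⟩
  rw [h2, Finset.sum_singleton, nPath_one_zero, one_mul]

lemma pvTT_top {E : Nat → Nat → Bool} {k : Nat} (hk : 2 ≤ k) :
    pvTT E k k = ∑ v ∈ Finset.range k,
      if v ≠ 0 ∧ E v 0 = true then nPath E k (2 ^ k - 1) v else 0 := by
  unfold pvTT
  have hpos : 0 < 2 ^ k := Nat.two_pow_pos k
  have h1 : (Finset.range (2 ^ k)).filter (fun m => pvPc k m = k ∧ m.testBit 0 = true)
      = {2 ^ k - 1} := by
    ext m
    simp only [Finset.mem_filter, Finset.mem_range, Finset.mem_singleton]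
    constructor
    · rintro ⟨hm, hpc, _⟩; exact pv_eq_full hm hpc
    · rintro rfl
      refine ⟨by omega, pvPc_full k, ?_⟩
      rw [Nat.testBit_two_pow_sub_one]; simp; omega
  rw [h1, Finset.sum_singleton]
  have h2 : (Finset.range k).filter (fun v => (2 ^ k - 1).testBit v = true)
      = Finset.range k := by
    apply Finset.filter_true_of_mem
    intro i hi
    rw [Nat.testBit_two_pow_sub_one]
    simpa using Finset.mem_range.mp hi
  rw [h2]
  apply Finset.sum_congr rfl
  intro v hv
  rw [pvDfs_stop (le_refl k)]
  have hfull : (2 : Nat) ^ k - 1 ≠ 1 := by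
    have : (4 : Nat) ≤ 2 ^ k := by
      calc (4 : Nat) = 2 ^ 2 := rfl
      _ ≤ 2 ^ k := Nat.pow_le_pow_right (by omega) hk
    omega
  rcases eq_or_ne v 0 with rfl | hv0
  · rw [nPath_zero_of_ne_one hfull]; simp
  · by_cases hE : E v 0 = true
    · simp [hE, hv0]
    · simp [hE, hv0]

lemma pvTT_step {E : Nat → Nat → Bool} {k t : Nat} (ht : 1 ≤ t) (htk : t < k) :
    pvTT E k t = pvTT E k (t + 1) := by
  unfold pvTT
  -- expand the DFS one level and push the path count inside
  have hL : ∀ m ∈ (Finset.range (2 ^ k)).filter (fun m => pvPc k m = t ∧ m.testBit 0 = true),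
      (∑ v ∈ (Finset.range k).filter (fun v => m.testBit v = true),
        nPath E k m v * pvDfs E k m v t)
      = ∑ w ∈ Finset.range k,
          (if m.testBit w = false
           then nPath E k (m ||| 1 <<< w) w * pvDfs E k (m ||| 1 <<< w) w (t + 1)
           else 0) := by
    intro m hm
    obtain ⟨hmr, hpc, hb0⟩ : m < 2 ^ k ∧ pvPc k m = t ∧ m.testBit 0 = true := by
      have h := Finset.mem_filter.mp hm
      exact ⟨Finset.mem_range.mp h.1, h.2.1, h.2.2⟩
    have h1 : ∀ v ∈ (Finset.range k).filter (fun v => m.testBit v = true),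
        nPath E k m v * pvDfs E k m v t
        = ∑ w ∈ Finset.range k,
            (if m.testBit w = false ∧ E v w = true
             then nPath E k m v * pvDfs E k (m ||| 1 <<< w) w (t + 1) else 0) := by
      intro v _
      rw [pvDfs_step htk, Finset.mul_sum]
      exact Finset.sum_congr rfl fun w _ => by rw [mul_ite, mul_zero]
    rw [Finset.sum_congr rfl h1, Finset.sum_comm]
    apply Finset.sum_congr rfl
    intro w _
    by_cases hbw : m.testBit w = false
    · rw [if_pos hbw]
      have h2 : ∀ v ∈ (Finset.range k).filter (fun v => m.testBit v = true),
          (if m.testBit w = false ∧ E v w = true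
           then nPath E k m v * pvDfs E k (m ||| 1 <<< w) w (t + 1) else 0)
          = (if E v w = true then nPath E k m v else 0)
              * pvDfs E k (m ||| 1 <<< w) w (t + 1) := by
        intro v _
        by_cases hE : E v w = true
        · rw [if_pos ⟨hbw, hE⟩, if_pos hE]
        · rw [if_neg (fun h => hE h.2), if_neg hE, zero_mul]
      rw [Finset.sum_congr rfl h2, ← Finset.sum_mul]
      congr 1
      rw [Finset.sum_filter, nPath_or hb0 hbw]
      apply Finset.sum_congr rfl
      intro u _
      by_cases hbu : m.testBit u = true
      · rw [if_pos hbu]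
        by_cases hE : E u w = true
        · rw [if_pos hE, if_pos ⟨hbu, hE⟩]
        · rw [if_neg hE, if_neg (fun h => hE h.2)]
      · rw [if_neg hbu, if_neg (fun h => hbu h.1)]
    · rw [if_neg hbw]
      apply Finset.sum_eq_zero
      intro v _
      rw [if_neg (fun h => hbw h.1)]
  rw [Finset.sum_congr rfl hL]
  -- drop the v = 0 terms from the right-hand side
  have hR : ∀ m ∈ (Finset.range (2 ^ k)).filter
        (fun m => pvPc k m = t + 1 ∧ m.testBit 0 = true),
      (∑ v ∈ (Finset.range k).filter (fun v => m.testBit v = true),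
        nPath E k m v * pvDfs E k m v (t + 1))
      = ∑ v ∈ Finset.range k,
          (if m.testBit v = true ∧ v ≠ 0
           then nPath E k m v * pvDfs E k m v (t + 1) else 0) := by
    intro m hm
    obtain ⟨hmr, hpc, hb0⟩ : m < 2 ^ k ∧ pvPc k m = t + 1 ∧ m.testBit 0 = true := by
      have h := Finset.mem_filter.mp hm
      exact ⟨Finset.mem_range.mp h.1, h.2.1, h.2.2⟩
    have hm1 : m ≠ 1 := by
      rintro rfl
      rw [pvPc_one (by omega)] at hpc
      omega
    rw [Finset.sum_filter]
    apply Finset.sum_congr rfl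
    intro v _
    rcases eq_or_ne v 0 with rfl | hv0
    · rw [nPath_zero_of_ne_one hm1, zero_mul]
      simp
    · by_cases hbv : m.testBit v = true
      · rw [if_pos hbv, if_pos ⟨hbv, hv0⟩]
      · rw [if_neg hbv, if_neg (fun h => hbv h.1)]
  rw [Finset.sum_congr rfl hR]
  -- reindex (m, w) ↦ (m ||| 2^w, w)
  rw [← Finset.sum_product', ← Finset.sum_product']
  have hPL : (∑ x ∈ ((Finset.range (2 ^ k)).filter
        (fun m => pvPc k m = t ∧ m.testBit 0 = true)) ×ˢ Finset.range k,
      if x.1.testBit x.2 = false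
      then nPath E k (x.1 ||| 1 <<< x.2) x.2 * pvDfs E k (x.1 ||| 1 <<< x.2) x.2 (t + 1)
      else 0)
      = ∑ x ∈ (((Finset.range (2 ^ k)).filter
            (fun m => pvPc k m = t ∧ m.testBit 0 = true)) ×ˢ Finset.range k).filter
          (fun x => x.1.testBit x.2 = false),
          nPath E k (x.1 ||| 1 <<< x.2) x.2 * pvDfs E k (x.1 ||| 1 <<< x.2) x.2 (t + 1) :=
    (Finset.sum_filter _ _).symm
  have hPR : (∑ x ∈ ((Finset.range (2 ^ k)).filter
        (fun m => pvPc k m = t + 1 ∧ m.testBit 0 = true)) ×ˢ Finset.range k,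
      if x.1.testBit x.2 = true ∧ x.2 ≠ 0
      then nPath E k x.1 x.2 * pvDfs E k x.1 x.2 (t + 1)
      else 0)
      = ∑ x ∈ (((Finset.range (2 ^ k)).filter
            (fun m => pvPc k m = t + 1 ∧ m.testBit 0 = true)) ×ˢ Finset.range k).filter
          (fun x => x.1.testBit x.2 = true ∧ x.2 ≠ 0),
          nPath E k x.1 x.2 * pvDfs E k x.1 x.2 (t + 1) :=
    (Finset.sum_filter _ _).symm
  rw [hPL, hPR]
  refine Finset.sum_nbij' (fun p => (p.1 ||| 1 <<< p.2, p.2)) (fun p => (p.1 ^^^ 1 <<< p.2, p.2))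
    ?_ ?_ ?_ ?_ ?_
  · rintro ⟨m, w⟩ hp
    have h := Finset.mem_filter.mp hp
    obtain ⟨hmS, hwk⟩ := Finset.mem_product.mp h.1
    have hbw : m.testBit w = false := h.2
    obtain ⟨hmr, hpc, hb0⟩ : m < 2 ^ k ∧ pvPc k m = t ∧ m.testBit 0 = true := by
      have h' := Finset.mem_filter.mp hmS
      exact ⟨Finset.mem_range.mp h'.1, h'.2.1, h'.2.2⟩
    have hwk' : w < k := Finset.mem_range.mp hwk
    have hw0 : w ≠ 0 := by rintro rfl; rw [hb0] at hbw; cases hbw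
    apply Finset.mem_filter.mpr
    constructor
    · apply Finset.mem_product.mpr
      refine ⟨Finset.mem_filter.mpr ⟨Finset.mem_range.mpr (pv_or_lt hmr hwk'), ?_, ?_⟩, hwk⟩
      · rw [pvPc_or hwk' hbw, hpc]
      · rw [pv_testBit_or, hb0]; rfl
    · refine ⟨by rw [pv_testBit_or]; simp, hw0⟩
  · rintro ⟨m, v⟩ hp
    have h := Finset.mem_filter.mp hp
    obtain ⟨hmS, hvk⟩ := Finset.mem_product.mp h.1
    have hbv : m.testBit v = true := h.2.1
    have hv0 : v ≠ 0 := h.2.2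
    obtain ⟨hmr, hpc, hb0⟩ : m < 2 ^ k ∧ pvPc k m = t + 1 ∧ m.testBit 0 = true := by
      have h' := Finset.mem_filter.mp hmS
      exact ⟨Finset.mem_range.mp h'.1, h'.2.1, h'.2.2⟩
    have hvk' : v < k := Finset.mem_range.mp hvk
    apply Finset.mem_filter.mpr
    constructor
    · apply Finset.mem_product.mpr
      refine ⟨Finset.mem_filter.mpr ⟨Finset.mem_range.mpr (lt_trans (pv_xor_lt hbv) hmr),
        ?_, ?_⟩, hvk⟩
      · have h2 := pvPc_xor hvk' hbv
        show pvPc k (m ^^^ 1 <<< v) = t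
        omega
      · rw [pv_testBit_xor, hb0]
        simp [Ne.symm hv0]
    · rw [pv_testBit_xor, hbv]
      simp
  · rintro ⟨m, w⟩ hp
    have h := Finset.mem_filter.mp hp
    have hbw : m.testBit w = false := h.2
    simp only [Prod.mk.injEq]
    exact ⟨pv_or_xor hbw, trivial⟩
  · rintro ⟨m, v⟩ hp
    have h := Finset.mem_filter.mp hp
    have hbv : m.testBit v = true := h.2.1
    simp only [Prod.mk.injEq]
    exact ⟨pv_xor_or hbv, trivial⟩
  · rintro ⟨m, w⟩ _
    rfl

lemma pvTT_chain {E : Nat → Nat → Bool} {k t : Nat} (h1 : 1 ≤ t) (h2 : t ≤ k) :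
    pvTT E k 1 = pvTT E k t := by
  induction t, h1 using Nat.le_induction with
  | base => rfl
  | succ t ht ih => rw [ih (by omega), pvTT_step ht (by omega)]

-- ## the DP invariant

-- keys whose final dp value is already in place once all masks < M have been processed
def pvReady (k M m v : Nat) : Prop :=
  (m = 1 ∧ v = 0) ∨
    (v ≠ 0 ∧ v < k ∧ m.testBit 0 = true ∧ m.testBit v = true ∧ m < 2 ^ k ∧
      m ^^^ (1 <<< v) < M)

def pvInv (E : Nat → Nat → Bool) (k M : Nat) (d : PySem.Dict (Nat × Nat) Int) : Prop :=
  ∀ m v,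
    (pvReady k M m v → PySem.Dict.getD d (m, v) 0 = nPath E k m v) ∧
    (¬ pvReady k M m v → PySem.Dict.getD d (m, v) 0 = 0)

lemma pv_ready_mono {k M M' m v : Nat} (h : M ≤ M') (hr : pvReady k M m v) :
    pvReady k M' m v := by
  rcases hr with h1 | h2
  · exact Or.inl h1
  · exact Or.inr ⟨h2.1, h2.2.1, h2.2.2.1, h2.2.2.2.1, h2.2.2.2.2.1, by
      have := h2.2.2.2.2.2; omega⟩

lemma pv_inv_init (E : Nat → Nat → Bool) (k : Nat) :
    pvInv E k 1 (PySem.Dict.insert PySem.Dict.empty (1 <<< 0, 0) 1) := by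
  have h10 : (1 <<< 0 : Nat) = 1 := rfl
  intro m v
  constructor
  · intro hr
    have hmv : m = 1 ∧ v = 0 := by
      rcases hr with h | h
      · exact h
      · exfalso
        obtain ⟨hv0, _, hb0, _, _, hlt⟩ := h
        have hx : m ^^^ (1 <<< v) = 0 := by omega
        have hm : m = 1 <<< v := by
          have := Nat.xor_eq_zero_iff.mp hx
          exact this
        rw [hm, Nat.one_shiftLeft, Nat.testBit_two_pow_of_ne hv0] at hb0
        cases hb0
    obtain ⟨rfl, rfl⟩ := hmv
    rw [h10, PySem.Dict.getD_insert, if_pos rfl, nPath_one_zero]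
  · intro hr
    have hne : ((m, v) : Nat × Nat) ≠ ((1 <<< 0 : Nat), 0) := by
      intro h
      apply hr
      left
      have h1 := congrArg Prod.fst h
      have h2 := congrArg Prod.snd h
      simp at h1 h2
      exact ⟨h1, h2⟩
    rw [PySem.Dict.getD_insert, if_neg hne, PySem.Dict.getD_empty]

-- value added to each key by the inner w-loop, run with multiplier cnt from (mask, v)
lemma pv_wfold (E : Nat → Nat → Bool) (M v : Nat) (cnt : Int) :
    ∀ (n : Nat) (d : PySem.Dict (Nat × Nat) Int) (m w : Nat),
      PySem.Dict.getD ((List.range n).foldl (pvWBody E M v cnt) d) (m, w) 0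
        = PySem.Dict.getD d (m, w) 0 +
            (if w < n ∧ M.testBit w = false ∧ E v w = true ∧ m = M ||| (1 <<< w)
             then cnt else 0) := by
  intro n
  induction n with
  | zero => intro d m w; simp
  | succ n ih =>
    intro d m w
    rw [List.range_succ, List.foldl_append]
    simp only [List.foldl_cons, List.foldl_nil]
    have ihd := ih d
    set X := List.foldl (pvWBody E M v cnt) d (List.range n) with hX
    unfold pvWBody
    by_cases hskip : M &&& (1 <<< n) ≠ 0
    · rw [if_pos hskip, ihd]
      have hbn : M.testBit n = true := by
        rcases h : M.testBit n
        · exact absurd ((pv_and_eq_zero M n).mpr h) hskip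
        · rfl
      congr 1
      rcases eq_or_ne w n with rfl | hw
      · simp [hbn]
      · by_cases hlt : w < n
        · simp [hlt, show w < n + 1 by omega]
        · simp [hlt, show ¬ w < n + 1 by omega]
    · rw [if_neg hskip]
      rw [not_not] at hskip
      have hbn : M.testBit n = false := (pv_and_eq_zero M n).mp hskip
      by_cases hE : E v n = true
      · rw [if_pos hE]
        rw [PySem.Dict.getD_insert]
        by_cases hkey : ((m, w) : Nat × Nat) = (M ||| (1 <<< n), n)
        · rw [if_pos hkey, ihd]
          have hm : m = M ||| (1 <<< n) := congrArg Prod.fst hkey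
          have hw : w = n := congrArg Prod.snd hkey
          subst hw
          simp [hm, hbn, hE, show w < w + 1 by omega]
        · rw [if_neg hkey, ihd]
          congr 1
          rcases eq_or_ne w n with rfl | hw
          · have hm : m ≠ M ||| (1 <<< w) := fun h => hkey (by rw [h])
            simp [hm]
          · by_cases hlt : w < n
            · simp [hlt, show w < n + 1 by omega]
            · simp [hlt, show ¬ w < n + 1 by omega]
      · rw [if_neg hE, ihd]
        congr 1
        rcases eq_or_ne w n with rfl | hw
        · simp [hE]
        · by_cases hlt : w < n
          · simp [hlt, show w < n + 1 by omega]
          · simp [hlt, show ¬ w < n + 1 by omega]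

-- partial invariant through the middle v-loop of mask M
def pvJ (E : Nat → Nat → Bool) (k M n : Nat) (d : PySem.Dict (Nat × Nat) Int) : Prop :=
  ∀ m w,
    (pvReady k M m w → PySem.Dict.getD d (m, w) 0 = nPath E k m w) ∧
    (¬ pvReady k M m w → PySem.Dict.getD d (m, w) 0 =
       if w ≠ 0 ∧ w < k ∧ M.testBit w = false ∧ m = M ||| (1 <<< w)
       then ∑ u ∈ Finset.range n,
         (if M.testBit u = true ∧ E u w = true then nPath E k M u else 0)
       else 0)

lemma pv_j_zero {E : Nat → Nat → Bool} {k M : Nat} {d : PySem.Dict (Nat × Nat) Int}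
    (h : pvInv E k M d) : pvJ E k M 0 d := by
  intro m w
  refine ⟨(h m w).1, fun hr => ?_⟩
  rw [(h m w).2 hr]
  simp

-- a v-iteration that writes nothing (bit not set, or zero count) still extends pvJ
lemma pv_j_skip {E : Nat → Nat → Bool} {k M v : Nat} {d : PySem.Dict (Nat × Nat) Int}
    (hJ : pvJ E k M v d) (h : M.testBit v = false ∨ nPath E k M v = 0) :
    pvJ E k M (v + 1) d := by
  intro m w
  refine ⟨(hJ m w).1, fun hr => ?_⟩
  rw [(hJ m w).2 hr]
  by_cases hc : w ≠ 0 ∧ w < k ∧ M.testBit w = false ∧ m = M ||| (1 <<< w)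
  · rw [if_pos hc, if_pos hc, Finset.sum_range_succ]
    rcases h with h | h
    · simp [h]
    · simp [h]
  · rw [if_neg hc, if_neg hc]

-- a v-iteration that runs the w-loop with cnt = nPath E k M v extends pvJ
lemma pv_j_update {E : Nat → Nat → Bool} {k M v : Nat} {d : PySem.Dict (Nat × Nat) Int}
    (h0 : M.testBit 0 = true) (hbv : M.testBit v = true)
    (hJ : pvJ E k M v d) :
    pvJ E k M (v + 1) ((List.range k).foldl (pvWBody E M v (nPath E k M v)) d) := by
  intro m w
  rw [pv_wfold E M v (nPath E k M v) k d m w]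
  constructor
  · intro hr
    have hadd : ¬ (w < k ∧ M.testBit w = false ∧ E v w = true ∧ m = M ||| (1 <<< w)) := by
      rintro ⟨hwk, hMw, hEw, rfl⟩
      rcases hr with hl | hrr
      · -- (m, w) = (1, 0) is impossible: M has bit 0 but M.testBit w = false forces w ≠ 0,
        -- and then M ||| 2^w has at least two bits
        obtain ⟨hm1, hw0⟩ := hl
        subst hw0
        rw [h0] at hMw; cases hMw
      · have := hrr.2.2.2.2.2
        rw [pv_or_xor hMw] at this
        omega
    rw [if_neg hadd, add_zero]
    exact (hJ m w).1 hr
  · intro hr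
    rw [(hJ m w).2 hr]
    by_cases hc : w ≠ 0 ∧ w < k ∧ M.testBit w = false ∧ m = M ||| (1 <<< w)
    · obtain ⟨hw0, hwk, hMw, hm⟩ := hc
      have hcJ : w ≠ 0 ∧ w < k ∧ M.testBit w = false ∧ m = M ||| (1 <<< w) :=
        ⟨hw0, hwk, hMw, hm⟩
      rw [if_pos hcJ, if_pos hcJ, Finset.sum_range_succ]
      congr 1
      by_cases hE : E v w = true
      · rw [if_pos (show w < k ∧ M.testBit w = false ∧ E v w = true ∧ m = M ||| (1 <<< w) from
            ⟨hwk, hMw, hE, hm⟩),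
          if_pos (show M.testBit v = true ∧ E v w = true from ⟨hbv, hE⟩)]
      · rw [if_neg (show ¬ (w < k ∧ M.testBit w = false ∧ E v w = true ∧ m = M ||| (1 <<< w)) from
            fun h => hE h.2.2.1),
          if_neg (show ¬ (M.testBit v = true ∧ E v w = true) from fun h => hE h.2)]
    · rw [if_neg hc, if_neg hc]
      have hadd : ¬ (w < k ∧ M.testBit w = false ∧ E v w = true ∧ m = M ||| (1 <<< w)) := by
        rintro ⟨hwk, hMw, hEw, rfl⟩
        apply hc
        refine ⟨?_, hwk, hMw, rfl⟩
        rintro rfl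
        rw [h0] at hMw; cases hMw
      rw [if_neg hadd, add_zero]

lemma pv_j_step {E : Nat → Nat → Bool} {k M v : Nat} {d : PySem.Dict (Nat × Nat) Int}
    (hv : v < k) (h0 : M.testBit 0 = true) (hMk : M < 2 ^ k)
    (hJ : pvJ E k M v d) : pvJ E k M (v + 1) (pvVBody E k M d v) := by
  unfold pvVBody
  by_cases hbit : M &&& (1 <<< v) = 0
  · rw [if_pos hbit]
    exact pv_j_skip hJ (Or.inl ((pv_and_eq_zero M v).mp hbit))
  · rw [if_neg hbit]
    have hbv : M.testBit v = true := by
      rcases h : M.testBit v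
      · exact absurd ((pv_and_eq_zero M v).mpr h) hbit
      · rfl
    have hval : PySem.Dict.getD d (M, v) 0 = nPath E k M v := by
      rcases eq_or_ne v 0 with rfl | hv0
      · rcases eq_or_ne M 1 with rfl | hM1
        · rw [(hJ 1 0).1 (Or.inl ⟨rfl, rfl⟩)]
        · have hnr : ¬ pvReady k M M 0 := by
            rintro (⟨h1, _⟩ | ⟨h1, _⟩)
            · exact hM1 h1
            · exact h1 rfl
          rw [(hJ M 0).2 hnr, nPath_zero_of_ne_one hM1]
          simp
      · exact (hJ M v).1 (Or.inr ⟨hv0, hv, h0, hbv, hMk, pv_xor_lt hbv⟩)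
    rcases hq : PySem.Dict.get? d (M, v) with _ | cnt
    · apply pv_j_skip hJ
      right
      rw [← hval, PySem.Dict.getD_eq_get?_getD, hq]
      rfl
    · have hcnt : cnt = nPath E k M v := by
        rw [← hval, PySem.Dict.getD_eq_get?_getD, hq]
        rfl
      show pvJ E k M (v + 1)
        (if cnt = 0 then d else (List.range k).foldl (pvWBody E M v cnt) d)
      by_cases hz : cnt = 0
      · rw [if_pos hz]
        apply pv_j_skip hJ
        right
        rw [← hcnt, hz]
      · rw [if_neg hz, hcnt]
        exact pv_j_update h0 hbv hJ

lemma pv_j_fold {E : Nat → Nat → Bool} {k M : Nat} {d : PySem.Dict (Nat × Nat) Int}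
    (h0 : M.testBit 0 = true) (hMk : M < 2 ^ k) (hJ : pvJ E k M 0 d) :
    ∀ n, n ≤ k → pvJ E k M n ((List.range n).foldl (pvVBody E k M) d) := by
  intro n
  induction n with
  | zero => intro _; simpa using hJ
  | succ n ih =>
    intro hn
    rw [List.range_succ, List.foldl_append]
    simp only [List.foldl_cons, List.foldl_nil]
    exact pv_j_step (by omega) h0 hMk (ih (by omega))

lemma pv_inv_mstep {E : Nat → Nat → Bool} {k M : Nat} {d : PySem.Dict (Nat × Nat) Int}
    (hMk : M < 2 ^ k) (hInv : pvInv E k M d) :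
    pvInv E k (M + 1) (pvMBody E k d M) := by
  unfold pvMBody
  by_cases hb : M &&& (1 <<< 0) = 0
  · rw [if_pos hb]
    have h0 : M.testBit 0 = false := (pv_and_eq_zero M 0).mp hb
    intro m v
    constructor
    · intro hr
      have hrm : pvReady k M m v := by
        rcases hr with h | h
        · exact Or.inl h
        · obtain ⟨hv0, hvk, hb0, hbv, hm2k, hlt⟩ := h
          refine Or.inr ⟨hv0, hvk, hb0, hbv, hm2k, ?_⟩
          rcases Nat.lt_succ_iff_lt_or_eq.mp hlt with hlt' | heq
          · exact hlt'
          · exfalso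
            have hM0 : M.testBit 0 = true := by
              rw [← heq, pv_testBit_xor]
              simp [Ne.symm hv0, hb0]
            rw [h0] at hM0; cases hM0
      exact (hInv m v).1 hrm
    · intro hr
      exact (hInv m v).2 (fun hrm => hr (pv_ready_mono (by omega) hrm))
  · rw [if_neg hb]
    have h0 : M.testBit 0 = true := by
      rcases h : M.testBit 0
      · exact absurd ((pv_and_eq_zero M 0).mpr h) hb
      · rfl
    have hJ := pv_j_fold h0 hMk (pv_j_zero hInv) k (le_refl k)
    intro m v
    constructor
    · intro hr
      by_cases hrm : pvReady k M m v
      · exact (hJ m v).1 hrm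
      · rcases hr with hl | hrr
        · exact absurd (Or.inl hl) hrm
        · obtain ⟨hv0, hvk, hb0, hbv, hm2k, hlt⟩ := hrr
          have heq : m ^^^ (1 <<< v) = M := by
            rcases Nat.lt_succ_iff_lt_or_eq.mp hlt with h | h
            · exact absurd (Or.inr ⟨hv0, hvk, hb0, hbv, hm2k, h⟩) hrm
            · exact h
          have hMv : M.testBit v = false := by
            rw [← heq, pv_testBit_xor]
            simp [hbv]
          have hmor : m = M ||| (1 <<< v) := by
            rw [← heq, pv_xor_or hbv]
          rw [(hJ m v).2 hrm, if_pos ⟨hv0, hvk, hMv, hmor⟩, hmor, nPath_or h0 hMv]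
    · intro hr
      have hrm : ¬ pvReady k M m v := fun h => hr (pv_ready_mono (by omega) h)
      rw [(hJ m v).2 hrm]
      by_cases hc : v ≠ 0 ∧ v < k ∧ M.testBit v = false ∧ m = M ||| (1 <<< v)
      · exfalso
        obtain ⟨hv0, hvk, hMv, hmor⟩ := hc
        apply hr
        refine Or.inr ⟨hv0, hvk, ?_, ?_, ?_, ?_⟩
        · rw [hmor, pv_testBit_or, h0]; rfl
        · rw [hmor, pv_testBit_or]; simp
        · rw [hmor]; exact pv_or_lt hMk hvk
        · rw [hmor, pv_or_xor hMv]; omega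
      · rw [if_neg hc]

lemma pv_m_fold {E : Nat → Nat → Bool} {k : Nat} :
    ∀ (n s : Nat) (d : PySem.Dict (Nat × Nat) Int), s + n ≤ 2 ^ k → pvInv E k s d →
      pvInv E k (s + n) ((List.range' s n).foldl (pvMBody E k) d) := by
  intro n
  induction n with
  | zero => intro s d _ h; simpa using h
  | succ n ih =>
    intro s d hsn h
    rw [List.range'_succ]
    simp only [List.foldl_cons]
    have hrec := ih (s + 1) (pvMBody E k d s) (by omega) (pv_inv_mstep (by omega) h)
    have heq : s + (n + 1) = (s + 1) + n := by omega
    rw [heq]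
    exact hrec

lemma pv_inv_dp (E : Nat → Nat → Bool) (k : Nat) : pvInv E k (2 ^ k) (pvDP E k) := by
  have hone : 1 ≤ 2 ^ k := Nat.one_le_two_pow
  have h := pv_m_fold (E := E) (k := k) (2 ^ k - 1) 1
    (PySem.Dict.insert PySem.Dict.empty (1 <<< 0, 0) 1) (by omega) (pv_inv_init E k)
  rw [show 1 + (2 ^ k - 1) = 2 ^ k by omega] at h
  have heq : pvDP E k = (List.range' 1 (2 ^ k - 1)).foldl (pvMBody E k)
      (PySem.Dict.insert PySem.Dict.empty (1 <<< 0, 0) 1) := by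
    unfold pvDP
    rw [Nat.one_shiftLeft k]
  rw [heq]
  exact h

-- ## from the DP to the telescoping sum, and assembly

lemma pvTotal_eq {E : Nat → Nat → Bool} {k : Nat} (hk : 2 ≤ k) :
    pvTotal E k = ∑ v ∈ Finset.range k,
      if v ≠ 0 ∧ E v 0 = true then nPath E k (2 ^ k - 1) v else 0 := by
  have hInv := pv_inv_dp E k
  unfold pvTotal
  have hbody : ∀ (acc : Int) (v : Nat), v ∈ List.range k →
      (if v = 0 then acc
       else match PySem.Dict.get? (pvDP E k) ((1 <<< k) - 1, v) with
         | none => acc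
         | some c => if c > 0 ∧ E v 0 = true then acc + c else acc)
      = if v ≠ 0 ∧ E v 0 = true then acc + nPath E k (2 ^ k - 1) v else acc := by
    intro acc v hv
    have hvk : v < k := List.mem_range.mp hv
    rcases eq_or_ne v 0 with rfl | hv0
    · simp
    · rw [if_neg hv0]
      have hkey : ((1 <<< k) - 1 : Nat) = 2 ^ k - 1 := by rw [Nat.one_shiftLeft]
      rw [hkey]
      have hfb0 : (2 ^ k - 1 : Nat).testBit 0 = true := by
        rw [Nat.testBit_two_pow_sub_one]; simp; omega
      have hfbv : (2 ^ k - 1 : Nat).testBit v = true := by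
        rw [Nat.testBit_two_pow_sub_one]; simp [hvk]
      have hflt : (2 ^ k - 1 : Nat) < 2 ^ k := by
        have : 1 ≤ 2 ^ k := Nat.one_le_two_pow
        omega
      have hval := (hInv (2 ^ k - 1) v).1
        (Or.inr ⟨hv0, hvk, hfb0, hfbv, hflt, lt_trans (pv_xor_lt hfbv) hflt⟩)
      have hnn := nPath_nonneg E k (2 ^ k - 1) v
      rcases hq : PySem.Dict.get? (pvDP E k) (2 ^ k - 1, v) with _ | c
      · have hz : nPath E k (2 ^ k - 1) v = 0 := by
          rw [← hval, PySem.Dict.getD_eq_get?_getD, hq]; rfl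
        show acc = if v ≠ 0 ∧ E v 0 = true then acc + nPath E k (2 ^ k - 1) v else acc
        rw [hz]
        by_cases hE : E v 0 = true
        · rw [if_pos (show v ≠ 0 ∧ E v 0 = true from ⟨hv0, hE⟩), add_zero]
        · rw [if_neg (show ¬ (v ≠ 0 ∧ E v 0 = true) from fun h => hE h.2)]
      · have hc : c = nPath E k (2 ^ k - 1) v := by
          rw [← hval, PySem.Dict.getD_eq_get?_getD, hq]; rfl
        rw [hc]
        show (if nPath E k (2 ^ k - 1) v > 0 ∧ E v 0 = true
              then acc + nPath E k (2 ^ k - 1) v else acc)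
            = if v ≠ 0 ∧ E v 0 = true then acc + nPath E k (2 ^ k - 1) v else acc
        by_cases hE : E v 0 = true
        · rcases lt_or_eq_of_le hnn with hpos | hzero
          · rw [if_pos (show nPath E k (2 ^ k - 1) v > 0 ∧ E v 0 = true from ⟨hpos, hE⟩),
              if_pos (show v ≠ 0 ∧ E v 0 = true from ⟨hv0, hE⟩)]
          · rw [← hzero]
            simp
        · rw [if_neg (show ¬ (nPath E k (2 ^ k - 1) v > 0 ∧ E v 0 = true) from fun h => hE h.2),
            if_neg (show ¬ (v ≠ 0 ∧ E v 0 = true) from fun h => hE h.2)]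
  rw [pv_foldl_ite_add_mem (fun v => v ≠ 0 ∧ E v 0 = true)
        (fun v => nPath E k (2 ^ k - 1) v) _ (List.range k) hbody 0, zero_add, pv_sum_range]

lemma pv_main {E : Nat → Nat → Bool} {k : Nat} (hk : 2 ≤ k) :
    pvTotal E k = pvDfs E k 1 0 1 := by
  rw [pvTotal_eq hk, ← pvTT_top hk, ← pvTT_chain (t := k) (by omega) (le_refl k),
    pvTT_base (by omega)]

lemma pvTotal_zero (E : Nat → Nat → Bool) : pvTotal E 0 = 0 := rfl

lemma pvTotal_one (E : Nat → Nat → Bool) : pvTotal E 1 = 0 := rfl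

-- ===== VERDICT (by name: the statement is the Claim_ definition above) =====
theorem count_directed_ham_cycles_spec : Claim_equal_count_directed_ham_cycles := by
  unfold Claim_equal_count_directed_ham_cycles
  intro A verts _ _
  unfold Spec_count_directed_ham_cycles
  unfold count_directed_ham_cycles count_directed_ham_cycles_alt
  by_cases h3 : verts.length = 3
  · simp [h3]
  · simp only [h3, if_false]
    rcases Nat.lt_or_ge verts.length 2 with h2 | h2
    · rw [if_pos h2]
      have h01 : verts.length = 0 ∨ verts.length = 1 := by omega
      rcases h01 with h | h <;> rw [h]
      · exact pvTotal_zero _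
      · exact pvTotal_one _
    · rw [if_neg (by omega : ¬ verts.length < 2)]
      exact pv_main h2
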